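-- pv_equiv track=rewrite | github.com/Cracko298/Better-Binary-Model-Format | generator.py | reorder_vertices_for_locality
-- ===== SOURCE A (Python) =====
-- def reorder_vertices_for_locality(vertices, faces):
--     remap = {}
--     reordered_vertices = []
--     reordered_faces = []
--     for face in faces:
--         new_face = []
--         for idx in face:
--             if idx not in remap:
--                 remap[idx] = len(reordered_vertices)
--                 reordered_vertices.append(vertices[idx])
--             new_face.append(remap[idx])
--         reordered_faces.append(tuple(new_face))
--     if len(reordered_vertices) < len(vertices):
--         for idx, vertex in enumerate(vertices):
--             if idx not in remap:
--                 remap[idx] = len(reordered_vertices)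
--                 reordered_vertices.append(vertex)
--     return reordered_vertices, reordered_faces
-- ===== SOURCE B (Python) =====
-- def reorder_vertices_for_locality(vertices, faces):
--     # Record, for every distinct face index, the position of its FIRST occurrence
--     # in the flattened face stream.
--     first_pos = {}
--     pos = 0
--     for face in faces:
--         for idx in face:
--             if idx not in first_pos:
--                 first_pos[idx] = pos
--             pos += 1
--     # Derive the new vertex order by SORTING the used indices by first occurrence,
--     # then appending the unused vertex indices in ascending order.
--     order = sorted(first_pos, key=lambda k: first_pos[k])
--     if len(order) < len(vertices):
--         order.extend(i for i in range(len(vertices)) if i not in first_pos)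
--     # Rebuild the vertex list and the faces from the order table.
--     remap = {k: j for j, k in enumerate(order)}
--     return [vertices[k] for k in order], [tuple(remap[i] for i in face) for face in faces]
-- ===== Notes on version B (the rewrite author's own statement) =====
-- stated objective: alternative
-- what changed: A incrementally assigns output slots while scanning faces (remap value = current output length) and rewrites each face inline; B never maintains the output during the scan: it only records each index's first-occurrence position in the flattened face stream, derives the vertex order afterwards by SORTING the used indices by that position (plus unused indices from range(n)), and reconstructs vertices, remap and faces from that order table.
import Mathlib
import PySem

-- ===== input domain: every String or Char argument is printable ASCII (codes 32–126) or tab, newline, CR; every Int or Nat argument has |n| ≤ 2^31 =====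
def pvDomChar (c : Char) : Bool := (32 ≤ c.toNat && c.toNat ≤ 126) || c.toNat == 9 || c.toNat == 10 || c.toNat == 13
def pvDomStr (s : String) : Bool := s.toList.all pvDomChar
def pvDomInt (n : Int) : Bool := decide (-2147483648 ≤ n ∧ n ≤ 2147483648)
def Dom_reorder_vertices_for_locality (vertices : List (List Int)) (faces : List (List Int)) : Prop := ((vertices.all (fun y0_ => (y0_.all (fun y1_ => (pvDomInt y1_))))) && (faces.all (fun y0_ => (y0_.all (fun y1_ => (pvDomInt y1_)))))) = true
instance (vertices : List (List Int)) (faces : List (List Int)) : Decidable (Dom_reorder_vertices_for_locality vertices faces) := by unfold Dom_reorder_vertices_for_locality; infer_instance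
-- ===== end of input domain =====

-- B replaces A's incremental slot assignment by a sort of the used indices by their
-- first-occurrence position in the flattened face stream, rebuilding vertices, remap and
-- faces from the resulting order table afterwards (alternative algorithm; same result).

-- ===== PORT A =====
-- inner loop body 'for idx in face' of A (remap, reordered_vertices, new_face as state);
-- vertices[idx] is PySem.List.pyGet?; its 'none' (IndexError) is excluded by Pre_, .getD [] is unreachable there
def pvAIdx (vertices : List (List Int))
    (t : PySem.Dict Int Int × List (List Int) × List Int) (idx : Int) :
    PySem.Dict Int Int × List (List Int) × List Int :=
  let s2 :=
    if t.1.contains idx = false then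
      (t.1.insert idx (t.2.1.length : Int), t.2.1 ++ [(PySem.List.pyGet? vertices idx).getD []])
    else (t.1, t.2.1)
  (s2.1, s2.2, t.2.2 ++ [s2.1.getD idx 0])

-- outer loop body 'for face in faces' of A
def pvAFace (vertices : List (List Int))
    (s : PySem.Dict Int Int × List (List Int) × List (List Int)) (face : List Int) :
    PySem.Dict Int Int × List (List Int) × List (List Int) :=
  let r := face.foldl (pvAIdx vertices) (s.1, s.2.1, ([] : List Int))
  (r.1, r.2.1, s.2.2 ++ [r.2.2])

-- A's trailing 'if len(reordered_vertices) < len(vertices): for idx, vertex in enumerate(vertices): …'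
def pvALeftover (vertices : List (List Int))
    (s : PySem.Dict Int Int × List (List Int)) : PySem.Dict Int Int × List (List Int) :=
  if s.2.length < vertices.length then
    (PySem.List.enumerate vertices).foldl
      (fun t p =>
        if t.1.contains p.1 = false then (t.1.insert p.1 (t.2.length : Int), t.2 ++ [p.2]) else t) s
  else s

def reorder_vertices_for_locality (vertices : List (List Int)) (faces : List (List Int)) :
    List (List Int) × List (List Int) :=
  let st := faces.foldl (pvAFace vertices) (PySem.Dict.empty, ([] : List (List Int)), ([] : List (List Int)))
  let fin := pvALeftover vertices (st.1, st.2.1)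
  (fin.2, st.2.2)

-- ===== PORT B =====
-- B's inner loop body: record the first-occurrence position, advance the position counter
def pvFpIdx (t : PySem.Dict Int Int × Int) (idx : Int) : PySem.Dict Int Int × Int :=
  (if t.1.contains idx = false then t.1.insert idx t.2 else t.1, t.2 + 1)

-- B's outer loop body 'for face in faces'
def pvFpFace (s : PySem.Dict Int Int × Int) (face : List Int) : PySem.Dict Int Int × Int :=
  face.foldl pvFpIdx s

def reorder_vertices_for_locality_alt (vertices : List (List Int)) (faces : List (List Int)) :
    List (List Int) × List (List Int) :=
  let fp := (faces.foldl pvFpFace (PySem.Dict.empty, (0 : Int))).1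
  -- sorted(first_pos, key=lambda k: first_pos[k]); first_pos[k] exists for every key, .getD 0 is its lookup
  let order0 := PySem.List.sorted fp.keys (fun k => fp.getD k 0) false
  let order :=
    if order0.length < vertices.length then
      order0 ++ (PySem.List.pyRange 0 (vertices.length : Int) 1).filter (fun i => !(fp.contains i))
    else order0
  -- remap = {k: j for j, k in enumerate(order)}
  let remap := (PySem.List.enumerate order).foldl (fun d p => d.insert p.2 p.1) PySem.Dict.empty
  -- remap[i] raises KeyError only where A raises too (outside Pre_); .getD 0 is its lookup
  (order.map (fun k => (PySem.List.pyGet? vertices k).getD []),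
   faces.map (fun face => face.map (fun i => remap.getD i 0)))

-- ===== PRECONDITION & SPEC =====
-- Pre_ excludes exactly the inputs where A raises IndexError: a face index outside [-len(vertices), len(vertices))
def Pre_reorder_vertices_for_locality (vertices : List (List Int)) (faces : List (List Int)) : Prop :=
  ∀ face ∈ faces, ∀ idx ∈ face, PySem.Raise.InRange vertices.length idx
instance (vertices : List (List Int)) (faces : List (List Int)) : Decidable (Pre_reorder_vertices_for_locality vertices faces) := by unfold Pre_reorder_vertices_for_locality; infer_instance

def pvWitness_reorder_vertices_for_locality : List (List Int) × List (List Int) :=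
  ([[0, 0], [1, 0], [2, 0]], [[2, 0], [2]])

def Spec_reorder_vertices_for_locality (vertices : List (List Int)) (faces : List (List Int)) (out : List (List Int) × List (List Int)) : Prop := out = reorder_vertices_for_locality_alt vertices faces
instance (vertices : List (List Int)) (faces : List (List Int)) (out : List (List Int) × List (List Int)) : Decidable (Spec_reorder_vertices_for_locality vertices faces out) := by unfold Spec_reorder_vertices_for_locality; infer_instance

-- ===== CLAIM (what is proved, stated in full; the proofs are below) =====
def Claim_equal_reorder_vertices_for_locality : Prop := ∀ (vertices : List (List Int)) (faces : List (List Int)), Dom_reorder_vertices_for_locality vertices faces → Pre_reorder_vertices_for_locality vertices faces → Spec_reorder_vertices_for_locality vertices faces (reorder_vertices_for_locality vertices faces)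

-- ===== LEMMAS AND PROOFS =====

-- the flat index stream of all faces
def pvFlat (faces : List (List Int)) : List Int := faces.flatMap (fun f => f)

-- the step of A's scan restricted to (remap, reordered_vertices)
def pvAStep (vertices : List (List Int))
    (t : PySem.Dict Int Int × List (List Int)) (idx : Int) :
    PySem.Dict Int Int × List (List Int) :=
  if t.1.contains idx = false then
    (t.1.insert idx (t.2.length : Int), t.2 ++ [(PySem.List.pyGet? vertices idx).getD []])
  else t

-- a contained key has some value
theorem pvGetSome {d : PySem.Dict Int Int} {k : Int} (h : d.contains k = true) :
    ∃ w, d.get? k = some w := by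
  have h2 : (d.get? k).isSome = true := by
    rw [← PySem.Dict.contains_eq_isSome_get?]; exact h
  exact Option.isSome_iff_exists.mp h2

-- folding pvAStep never disturbs an existing table entry (fresh keys only)
theorem pvA_mono (v : List (List Int)) (l : List Int) (d : PySem.Dict Int Int)
    (rv : List (List Int)) (k : Int) (w : Int) (h : d.get? k = some w) :
    ((l.foldl (pvAStep v) (d, rv)).1).get? k = some w := by
  induction l generalizing d rv with
  | nil => simpa using h
  | cons i rest ih =>
    simp only [List.foldl_cons]
    unfold pvAStep
    by_cases hc : d.contains i = false
    · simp only [hc, if_true]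
      apply ih
      have hki : k ≠ i := by
        intro he; subst he
        have hck : d.contains k = true := by
          rw [PySem.Dict.contains_eq_isSome_get?, h]; rfl
        simp [hck] at hc
      rw [PySem.Dict.get?_insert_of_ne d _ hki]; exact h
    · simp only [hc]; exact ih d rv h

-- every index of l is in the table after folding pvAStep over l
theorem pvA_contains (v : List (List Int)) (l : List Int) (d : PySem.Dict Int Int)
    (rv : List (List Int)) (i : Int) (hm : i ∈ l) :
    ((l.foldl (pvAStep v) (d, rv)).1).contains i = true := by
  induction l generalizing d rv with
  | nil => cases hm
  | cons j rest ih =>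
    simp only [List.foldl_cons]
    rcases List.mem_cons.mp hm with he | hr
    · subst he
      have h1 : ((pvAStep v (d, rv) i).1).contains i = true := by
        unfold pvAStep; split
        · exact PySem.Dict.contains_insert_self _ _ _
        · simp_all
      obtain ⟨w, hw⟩ := pvGetSome h1
      have hmono := pvA_mono v rest (pvAStep v (d, rv) i).1 (pvAStep v (d, rv) i).2 i w hw
      simp only [Prod.mk.eta] at hmono
      rw [PySem.Dict.contains_eq_isSome_get? _ i, hmono]; rfl
    · have := ih (pvAStep v (d, rv) j).1 (pvAStep v (d, rv) j).2 hr
      simpa using this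

-- A's inner face loop = A's table step fold + the face mapped through the resulting table
theorem pvFace_eq (v : List (List Int)) (face : List Int) (d : PySem.Dict Int Int)
    (rv : List (List Int)) (nf : List Int) :
    face.foldl (pvAIdx v) (d, rv, nf) =
      ((face.foldl (pvAStep v) (d, rv)).1, (face.foldl (pvAStep v) (d, rv)).2,
        nf ++ face.map (fun i => (face.foldl (pvAStep v) (d, rv)).1.getD i 0)) := by
  induction face generalizing d rv nf with
  | nil => simp
  | cons i rest ih =>
    simp only [List.foldl_cons, List.map_cons]
    have hstep : pvAIdx v (d, rv, nf) i =
        ((pvAStep v (d, rv) i).1, (pvAStep v (d, rv) i).2,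
          nf ++ [(pvAStep v (d, rv) i).1.getD i 0]) := by
      unfold pvAIdx pvAStep; split <;> rfl
    rw [hstep, ih]
    have hc : ((pvAStep v (d, rv) i).1).contains i = true := by
      unfold pvAStep; split
      · exact PySem.Dict.contains_insert_self _ _ _
      · simp_all
    obtain ⟨w, hw⟩ := pvGetSome hc
    have hmono := pvA_mono v rest (pvAStep v (d, rv) i).1 (pvAStep v (d, rv) i).2 i w hw
    simp only [Prod.mk.eta] at hmono
    have hD : ((rest.foldl (pvAStep v) (pvAStep v (d, rv) i)).1).getD i 0
        = ((pvAStep v (d, rv) i).1).getD i 0 := by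
      rw [PySem.Dict.getD_of_get?_eq_some _ 0 hmono, PySem.Dict.getD_of_get?_eq_some _ 0 hw]
    rw [hD]
    simp

-- A's outer loop = the pvAStep fold over the flattened faces + faces mapped through the final table
theorem pvFaces_eq (v : List (List Int)) (fs : List (List Int)) (d : PySem.Dict Int Int)
    (rv : List (List Int)) (rf : List (List Int)) :
    fs.foldl (pvAFace v) (d, rv, rf) =
      (((pvFlat fs).foldl (pvAStep v) (d, rv)).1,
        ((pvFlat fs).foldl (pvAStep v) (d, rv)).2,
        rf ++ fs.map (fun f => f.map
          (fun i => ((pvFlat fs).foldl (pvAStep v) (d, rv)).1.getD i 0))) := by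
  induction fs generalizing d rv rf with
  | nil => simp [pvFlat]
  | cons face rest ih =>
    simp only [pvFlat, List.foldl_cons, List.flatMap_cons, List.foldl_append, List.map_cons]
    have hface : pvAFace v (d, rv, rf) face =
        ((face.foldl (pvAStep v) (d, rv)).1, (face.foldl (pvAStep v) (d, rv)).2,
          rf ++ [face.map (fun i => (face.foldl (pvAStep v) (d, rv)).1.getD i 0)]) := by
      unfold pvAFace
      simp only [pvFace_eq, List.nil_append]
    rw [hface, ih]
    simp only [pvFlat, Prod.mk.eta]
    have hcong : face.map (fun i => (face.foldl (pvAStep v) (d, rv)).1.getD i 0)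
        = face.map (fun i =>
            ((rest.flatMap (fun f => f)).foldl (pvAStep v) (face.foldl (pvAStep v) (d, rv))).1.getD i 0) := by
      apply List.map_congr_left
      intro i hi
      obtain ⟨w, hw⟩ := pvGetSome (pvA_contains v face d rv i hi)
      have hmono := pvA_mono v (rest.flatMap (fun f => f))
        (face.foldl (pvAStep v) (d, rv)).1 (face.foldl (pvAStep v) (d, rv)).2 i w hw
      simp only [Prod.mk.eta] at hmono
      rw [PySem.Dict.getD_of_get?_eq_some _ 0 hw, PySem.Dict.getD_of_get?_eq_some _ 0 hmono]
    rw [hcong]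
    simp

-- items of the dict built by A's flat scan: the distinct indices, in first-occurrence
-- order, each with its output slot; the vertex list is those indices looked up
theorem pvAState (v : List (List Int)) (l : List Int) :
    (l.foldl (pvAStep v) (PySem.Dict.empty, ([] : List (List Int)))) =
      (PySem.Dict.mk ((PySem.List.enumerate (PySem.Set.ofList l)).map (fun p => (p.2, p.1))),
        (PySem.Set.ofList l).map (fun k => (PySem.List.pyGet? v k).getD [])) := by
  induction l using List.reverseRecOn with
  | nil => rfl
  | append_singleton l x ih =>
    rw [List.foldl_append, ih, List.foldl_cons, List.foldl_nil]
    have hkeys : (PySem.Dict.mk ((PySem.List.enumerate (PySem.Set.ofList l)).map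
        (fun p => (p.2, p.1)))).keys = PySem.Set.ofList l := by
      simp only [PySem.Dict.keys, List.map_map]
      exact PySem.List.map_snd_enumerate _ _
    have hcont : (PySem.Dict.mk ((PySem.List.enumerate (PySem.Set.ofList l)).map
        (fun p => (p.2, p.1)))).contains x = decide (x ∈ l) := by
      rw [PySem.Dict.contains_eq_decide_mem_keys, hkeys]
      simp [PySem.Set.mem_ofList]
    by_cases hx : x ∈ l
    · unfold pvAStep
      rw [hcont]
      simp only [hx, decide_true, if_neg (by simp : ¬ (true = false))]
      rw [PySem.Set.ofList_append_singleton,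
        PySem.Set.add_of_mem ((PySem.Set.mem_ofList l x).2 hx)]
    · unfold pvAStep
      rw [hcont]
      simp only [hx, decide_false, if_true]
      rw [PySem.Set.ofList_append_singleton,
        PySem.Set.add_of_not_mem (fun h => hx ((PySem.Set.mem_ofList l x).1 h))]
      refine Prod.ext ?_ (by simp)
      apply PySem.Dict.ext
      rw [PySem.Dict.items_insert_of_not_contains _ _ (by rw [hcont]; simp [hx])]
      simp only [PySem.List.enumerate_append,
        PySem.List.enumerate_cons, PySem.List.enumerate_nil, List.map_append,
        List.map_cons, List.map_nil, List.length_map]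
      simp

-- B's nested position scan = the pvFpIdx fold over the flattened faces
theorem pvFpFlat (fs : List (List Int)) (s : PySem.Dict Int Int × Int) :
    fs.foldl pvFpFace s = (pvFlat fs).foldl pvFpIdx s := by
  induction fs generalizing s with
  | nil => simp [pvFlat]
  | cons face rest ih =>
    simp only [pvFlat, List.foldl_cons, List.flatMap_cons, List.foldl_append]
    rw [ih]; rfl

-- first-occurrence position of k in l, as the value B stores
def pvFpos (l : List Int) (k : Int) : Int := ((PySem.List.index? l k).getD 0 : Nat)

-- items of B's first_pos dict: the distinct indices with their first flat positions
theorem pvFpState (l : List Int) :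
    l.foldl pvFpIdx (PySem.Dict.empty, (0 : Int)) =
      (PySem.Dict.mk ((PySem.Set.ofList l).map (fun k => (k, pvFpos l k))), (l.length : Int)) := by
  induction l using List.reverseRecOn with
  | nil => rfl
  | append_singleton l x ih =>
    rw [List.foldl_append, ih, List.foldl_cons, List.foldl_nil]
    have hkeys : (PySem.Dict.mk ((PySem.Set.ofList l).map (fun k => (k, pvFpos l k)))).keys
        = PySem.Set.ofList l := by
      simp [PySem.Dict.keys, List.map_map, Function.comp_def]
    have hcont : (PySem.Dict.mk ((PySem.Set.ofList l).map
        (fun k => (k, pvFpos l k)))).contains x = decide (x ∈ l) := by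
      rw [PySem.Dict.contains_eq_decide_mem_keys, hkeys]
      simp [PySem.Set.mem_ofList]
    have hlen : ((l ++ [x]).length : Int) = (l.length : Int) + 1 := by simp
    by_cases hx : x ∈ l
    · unfold pvFpIdx
      rw [hcont]
      simp only [hx, decide_true, if_neg (by simp : ¬ (true = false)), hlen]
      rw [PySem.Set.ofList_append_singleton,
        PySem.Set.add_of_mem ((PySem.Set.mem_ofList l x).2 hx)]
      refine Prod.ext ?_ rfl
      apply PySem.Dict.ext
      apply List.map_congr_left
      intro k hk
      rw [pvFpos, pvFpos, PySem.List.index?_append_of_mem _ ((PySem.Set.mem_ofList l k).1 hk)]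
    · unfold pvFpIdx
      rw [hcont]
      simp only [hx, decide_false, if_true, hlen]
      rw [PySem.Set.ofList_append_singleton,
        PySem.Set.add_of_not_mem (fun h => hx ((PySem.Set.mem_ofList l x).1 h))]
      refine Prod.ext ?_ rfl
      apply PySem.Dict.ext
      rw [PySem.Dict.items_insert_of_not_contains _ _ (by rw [hcont]; simp [hx])]
      simp only [List.map_append, List.map_cons, List.map_nil]
      congr 1
      · apply List.map_congr_left
        intro k hk
        rw [pvFpos, pvFpos, PySem.List.index?_append_of_mem _ ((PySem.Set.mem_ofList l k).1 hk)]
      · rw [pvFpos, PySem.List.index?_append_singleton_self l x hx]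
        rfl

-- the distinct indices are strictly increasing in first-occurrence position
theorem pvFposPairwise (l : List Int) :
    (PySem.Set.ofList l).Pairwise (fun a b => pvFpos l a < pvFpos l b) := by
  induction l using List.reverseRecOn with
  | nil => simp [PySem.Set.ofList]
  | append_singleton l x ih =>
    by_cases hx : x ∈ l
    · rw [PySem.Set.ofList_append_singleton,
        PySem.Set.add_of_mem ((PySem.Set.mem_ofList l x).2 hx)]
      refine List.Pairwise.imp_of_mem ?_ ih
      intro a b ha hb hlt
      rwa [pvFpos, pvFpos, PySem.List.index?_append_of_mem _ ((PySem.Set.mem_ofList l a).1 ha),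
        PySem.List.index?_append_of_mem _ ((PySem.Set.mem_ofList l b).1 hb)]
    · rw [PySem.Set.ofList_append_singleton,
        PySem.Set.add_of_not_mem (fun h => hx ((PySem.Set.mem_ofList l x).1 h))]
      rw [List.pairwise_append]
      refine ⟨?_, List.pairwise_singleton _ _, ?_⟩
      · refine List.Pairwise.imp_of_mem ?_ ih
        intro a b ha hb hlt
        rwa [pvFpos, pvFpos, PySem.List.index?_append_of_mem _ ((PySem.Set.mem_ofList l a).1 ha),
          PySem.List.index?_append_of_mem _ ((PySem.Set.mem_ofList l b).1 hb)]
      · intro a ha b hb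
        rw [List.mem_singleton] at hb
        rw [hb]
        have hal : a ∈ l := (PySem.Set.mem_ofList l a).1 ha
        rw [pvFpos, pvFpos, PySem.List.index?_append_of_mem _ hal,
          PySem.List.index?_append_singleton_self l x hx]
        obtain ⟨j, hj⟩ := Option.isSome_iff_exists.mp
          ((PySem.List.index?_isSome_iff l a).2 hal)
        obtain ⟨hjlt, -, -⟩ := PySem.List.getElem_of_index?_eq_some hj
        rw [hj]
        simp only [Option.getD_some]
        exact_mod_cast hjlt

-- the leftover pass appends exactly the vertices whose index is not a key yet
theorem pvLeftRv (vs : List (List Int)) (s : Int) (d : PySem.Dict Int Int) (rv : List (List Int)) :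
    ((PySem.List.enumerate vs s).foldl
        (fun t p =>
          if t.1.contains p.1 = false then (t.1.insert p.1 (t.2.length : Int), t.2 ++ [p.2]) else t)
        (d, rv)).2 =
      rv ++ ((PySem.List.enumerate vs s).filter (fun p => !(d.contains p.1))).map (·.2) := by
  induction vs generalizing s d rv with
  | nil => simp [PySem.List.enumerate_nil]
  | cons v vs ih =>
    rw [PySem.List.enumerate_cons, List.foldl_cons, List.filter_cons]
    by_cases hc : d.contains s = false
    · have hfc : (PySem.List.enumerate vs (s + 1)).filter
            (fun p => !((d.insert s (rv.length : Int)).contains p.1))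
          = (PySem.List.enumerate vs (s + 1)).filter (fun p => !(d.contains p.1)) := by
        apply List.filter_congr
        intro p hp
        obtain ⟨k, hk, hpe⟩ := (PySem.List.mem_enumerate_iff _ _ _).1 hp
        have hne : p.1 ≠ s := by rw [hpe]; simp; omega
        rw [PySem.Dict.contains_insert]
        simp [hne]
      simp only [hc, Bool.not_false, if_pos trivial]
      rw [ih, hfc]
      simp
    · have hct : d.contains s = true := by revert hc; cases d.contains s <;> simp
      simp only [hct, if_neg (by simp : ¬ (true = false)), Bool.not_true,
        if_neg (by simp : ¬ (false = true))]
      exact ih _ _ _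

-- the dict whose items pair each element of ord with its position reads back positions
theorem pvEnumDictGetD (ord : List Int) (hnd : ord.Nodup) (j : Nat) (hj : j < ord.length) :
    (PySem.Dict.mk ((PySem.List.enumerate ord).map (fun p => (p.2, p.1)))).getD ord[j] 0
      = (j : Int) := by
  have hkeys : (PySem.Dict.mk ((PySem.List.enumerate ord).map (fun p => (p.2, p.1)))).keys
      = ord := by
    simp only [PySem.Dict.keys, List.map_map]
    exact PySem.List.map_snd_enumerate _ _
  have hje : j < (PySem.List.enumerate ord 0).length := by
    rw [PySem.List.length_enumerate]; exact hj
  have hmem : (ord[j], (j : Int)) ∈ ((PySem.List.enumerate ord).map (fun p => (p.2, p.1))) := by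
    refine List.mem_map.2 ⟨(PySem.List.enumerate ord 0)[j], List.getElem_mem hje, ?_⟩
    rw [PySem.List.getElem_enumerate]
    simp
  have := PySem.Dict.getD_of_mem_items _ hmem (by rw [hkeys]; exact hnd) 0
  exact this

-- B's remap fold builds exactly the element-to-position dict of ord
theorem pvRemapItems (ord : List Int) (hnd : ord.Nodup) :
    (PySem.List.enumerate ord).foldl (fun d p => d.insert p.2 p.1) PySem.Dict.empty
      = PySem.Dict.mk ((PySem.List.enumerate ord).map (fun p => (p.2, p.1))) := by
  apply PySem.Dict.ext
  have h := PySem.Dict.items_foldl_insert_fresh (PySem.List.enumerate ord)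
    (fun p => p.2) (fun p => p.1) PySem.Dict.empty
    (fun a _ => PySem.Dict.contains_empty _)
    (by rw [PySem.List.map_snd_enumerate]; exact hnd)
  simpa using h

-- A's slot dict and B's remap dict agree on every face index, for any ord extending
-- the first-occurrence order
theorem pvGetDEq (L : List Int) (ord : List Int) (hnd : ord.Nodup)
    (hpre : (PySem.Set.ofList L) <+: ord) (i : Int) (hi : i ∈ L) :
    (PySem.Dict.mk ((PySem.List.enumerate (PySem.Set.ofList L)).map (fun p => (p.2, p.1)))).getD i 0
      = (PySem.Dict.mk ((PySem.List.enumerate ord).map (fun p => (p.2, p.1)))).getD i 0 := by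
  obtain ⟨j, hj, hji⟩ := List.mem_iff_getElem.mp ((PySem.Set.mem_ofList L i).2 hi)
  have hjo : j < ord.length := lt_of_lt_of_le hj hpre.length_le
  have hoj : ord[j] = (PySem.Set.ofList L)[j] := (List.IsPrefix.getElem hpre hj).symm
  rw [← hji, pvEnumDictGetD _ (PySem.Set.nodup_ofList L) j hj, ← hoj]
  exact (pvEnumDictGetD ord hnd j hjo).symm

-- ===== VERDICT (by name: the statement is the Claim_ definition above) =====
theorem reorder_vertices_for_locality_spec : Claim_equal_reorder_vertices_for_locality := by
  intro v fs _hdom _hpre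
  unfold Spec_reorder_vertices_for_locality
  unfold reorder_vertices_for_locality reorder_vertices_for_locality_alt
  rw [pvFaces_eq, pvFpFlat, pvAState, pvFpState]
  simp only [List.nil_append]
  set L := pvFlat fs with hLdef
  set S := PySem.Set.ofList L with hSdef
  set DA : PySem.Dict Int Int :=
    PySem.Dict.mk ((PySem.List.enumerate S).map (fun p => (p.2, p.1))) with hDA
  set FP : PySem.Dict Int Int :=
    PySem.Dict.mk (S.map (fun k => (k, pvFpos L k))) with hFP
  have hkeysFP : FP.keys = S := by
    rw [hFP]; simp [PySem.Dict.keys, List.map_map, Function.comp_def]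
  have hkeysDA : DA.keys = S := by
    rw [hDA]
    simp only [PySem.Dict.keys, List.map_map]
    exact PySem.List.map_snd_enumerate _ _
  have hfpgetD : ∀ k ∈ S, FP.getD k 0 = pvFpos L k := by
    intro k hk
    exact PySem.Dict.getD_of_mem_items _ (by rw [hFP]; exact List.mem_map.2 ⟨k, hk, rfl⟩)
      (by rw [hkeysFP, hSdef]; exact PySem.Set.nodup_ofList L) 0
  have horder0 : PySem.List.sorted FP.keys (fun k => FP.getD k 0) false = S := by
    apply PySem.List.sorted_eq_of_perm_of_pairwise_lt
    · rw [hkeysFP]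
    · refine List.Pairwise.imp_of_mem ?_ (by rw [hSdef]; exact pvFposPairwise L)
      intro a b ha hb hlt
      rw [hfpgetD a ha, hfpgetD b hb]; exact hlt
  rw [horder0]
  have hfpcont : ∀ i : Int, FP.contains i = decide (i ∈ L) := by
    intro i
    rw [PySem.Dict.contains_eq_decide_mem_keys, hkeysFP, hSdef]
    simp [PySem.Set.mem_ofList]
  have hDAcont : ∀ i : Int, DA.contains i = decide (i ∈ L) := by
    intro i
    rw [PySem.Dict.contains_eq_decide_mem_keys, hkeysDA, hSdef]
    simp [PySem.Set.mem_ofList]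
  unfold pvALeftover
  simp only [List.length_map]
  by_cases hg : List.length S < v.length
  · simp only [hg, if_pos trivial]
    set T := (PySem.List.pyRange 0 (v.length : Int)).filter (fun i => !(FP.contains i)) with hT
    have hTnodup : T.Nodup := (PySem.List.nodup_pyRange_one _ _).filter _
    have hdisj : ∀ a ∈ S, a ∉ T := by
      intro a haS haT
      have h2 := (List.mem_filter.1 haT).2
      rw [hfpcont] at h2
      simp only [Bool.not_eq_eq_eq_not, Bool.not_true, decide_eq_false_iff_not] at h2
      exact h2 ((PySem.Set.mem_ofList L a).1 (by rw [← hSdef]; exact haS))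
    have hordnodup : (S ++ T).Nodup := by
      refine List.Nodup.append ?_ hTnodup (fun a haS haT => hdisj a haS haT)
      rw [hSdef]; exact PySem.Set.nodup_ofList L
    rw [pvRemapItems (S ++ T) hordnodup]
    rw [pvLeftRv]
    refine Prod.ext ?_ ?_
    · simp only [List.map_append]
      congr 1
      rw [PySem.List.enumerate_eq_map_pyRange v [], List.filter_map, List.map_map]
      congr 1
      rw [hT]
      apply List.filter_congr
      intro i _
      simp only [Function.comp_def]
      rw [hDAcont, hfpcont]
    · simp only
      apply List.map_congr_left
      intro face hface
      apply List.map_congr_left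
      intro i hi
      have hiL : i ∈ L := by rw [hLdef, pvFlat]; exact List.mem_flatMap.2 ⟨face, hface, hi⟩
      rw [hDA, hSdef]
      exact pvGetDEq L (S ++ T) hordnodup (by rw [hSdef]; exact List.prefix_append _ _) i hiL
  · simp only [hg, ite_false]
    rw [pvRemapItems S (hSdef ▸ PySem.Set.nodup_ofList L)]
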